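-- pv_equiv track=rewrite | github.com/Swoorup/slang | extras/ci/analytics/ci_hosted_runner_usage.py | classify_hosted_label
-- ===== SOURCE A (Python) =====
-- HOSTED_LABEL_PREFIXES = ("ubuntu-", "macos-", "windows-")
--
-- def is_hosted_label(label):
--     """Return True if `label` is a GitHub-hosted-runner label.
--
--     GitHub-hosted images all start with one of `ubuntu-`, `macos-`,
--     `windows-`. Self-hosted runners carry the `self-hosted` label and
--     use NVIDIA-specific labels (`SM80Plus`, `GCP-T4`, etc.).
--     """
--     if not isinstance(label, str):
--         return False
--     return label.startswith(HOSTED_LABEL_PREFIXES)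
--
-- def classify_hosted_label(labels):
--     """Pick the canonical hosted label from a job's labels list.
--
--     Returns the first hosted label or None if no hosted label is
--     present. The convention `runs-on: [foo]` produces a single-element
--     list in practice, but matrix jobs and array syntax can produce
--     multiple labels.
--     """
--     if not labels:
--         return None
--     # `self-hosted` rules out hosted runners regardless of other labels.
--     if any(l == "self-hosted" for l in labels if isinstance(l, str)):
--         return None
--     for label in labels:
--         if is_hosted_label(label):
--             return label
--     return None
-- ===== SOURCE B (Python) =====
-- def classify_hosted_label(labels):
--     """Single pass: remember the first hosted label, but a `self-hosted`
--     anywhere (even later) short-circuits to None."""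
--     candidate = None
--     for label in labels:
--         if not isinstance(label, str):
--             continue
--         if label == "self-hosted":
--             return None
--         if candidate is None and label.startswith(("ubuntu-", "macos-", "windows-")):
--             candidate = label
--     return candidate
-- ===== Notes on version B (the rewrite author's own statement) =====
-- stated objective: simpler
-- what changed: Replaces A's two separate scans (an any() pass for self-hosted, then a for-loop for the first hosted label) with one single pass that carries a candidate and aborts on self-hosted.
import Mathlib
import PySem

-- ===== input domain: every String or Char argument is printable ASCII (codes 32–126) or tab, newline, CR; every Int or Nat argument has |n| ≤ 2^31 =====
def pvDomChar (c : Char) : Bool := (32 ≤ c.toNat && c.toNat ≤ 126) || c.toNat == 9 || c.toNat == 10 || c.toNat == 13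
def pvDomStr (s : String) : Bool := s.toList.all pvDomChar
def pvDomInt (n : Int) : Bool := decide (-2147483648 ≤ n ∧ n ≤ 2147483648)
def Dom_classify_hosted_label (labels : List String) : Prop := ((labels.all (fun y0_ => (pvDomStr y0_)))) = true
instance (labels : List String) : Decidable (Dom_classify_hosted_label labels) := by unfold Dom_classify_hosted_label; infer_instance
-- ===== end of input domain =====

-- B replaces A's two scans (any() for "self-hosted", then a loop for the first
-- hosted label) with one single pass carrying a candidate; simpler, same cost.


-- ===== PORT A =====
-- label.startswith(("ubuntu-", "macos-", "windows-")); isinstance(label, str) is always true here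
def is_hosted_label (label : String) : Bool :=
  PySem.Str.startswith label "ubuntu-" || PySem.Str.startswith label "macos-" || PySem.Str.startswith label "windows-"

-- the `for label in labels: if is_hosted_label(label): return label` loop
def pvAFirstHosted : List String → Option String
  | [] => none
  | l :: ls => if is_hosted_label l then some l else pvAFirstHosted ls

def classify_hosted_label (labels : List String) : Option String :=
  if labels = [] then none
  else if labels.any (fun l => l == "self-hosted") then none
  else pvAFirstHosted labels

-- ===== PORT B =====
-- single pass carrying `candidate`; returns none immediately on "self-hosted"
def pvBGo : List String → Option String → Option String
  | [], candidate => candidate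
  | label :: rest, candidate =>
    if label = "self-hosted" then none
    else pvBGo rest (if candidate.isNone && is_hosted_label label then some label else candidate)

def classify_hosted_label_alt (labels : List String) : Option String :=
  pvBGo labels none

-- ===== PRECONDITION & SPEC =====
def Spec_classify_hosted_label (labels : List String) (out : Option String) : Prop := out = classify_hosted_label_alt labels
instance (labels : List String) (out : Option String) : Decidable (Spec_classify_hosted_label labels out) := by unfold Spec_classify_hosted_label; infer_instance

-- ===== CLAIM (what is proved, stated in full; the proofs are below) =====
def Claim_equal_classify_hosted_label : Prop := ∀ (labels : List String), Dom_classify_hosted_label labels → Spec_classify_hosted_label labels (classify_hosted_label labels)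

-- ===== LEMMAS AND PROOFS =====

-- if some label is "self-hosted", B's loop ends with none regardless of the candidate
theorem pvBGo_self_hosted (labels : List String) (c : Option String)
    (h : "self-hosted" ∈ labels) : pvBGo labels c = none := by
  induction labels generalizing c with
  | nil => cases h
  | cons l ls ih =>
    simp only [pvBGo]
    by_cases hl : l = "self-hosted"
    · simp [hl]
    · have : "self-hosted" ∈ ls := by
        rcases List.mem_cons.mp h with h1 | h1
        · exact absurd h1.symm hl
        · exact h1
      simp [hl, ih _ this]

-- with no "self-hosted" present and no candidate yet, B's loop computes A's first-hosted scan
theorem pvBGo_no_self (labels : List String)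
    (h : "self-hosted" ∉ labels) : pvBGo labels none = pvAFirstHosted labels := by
  induction labels with
  | nil => rfl
  | cons l ls ih =>
    have hl : l ≠ "self-hosted" := fun e => h (e ▸ List.mem_cons_self)
    have hls : "self-hosted" ∉ ls := fun m => h (List.mem_cons_of_mem _ m)
    simp only [pvBGo, pvAFirstHosted, if_neg hl]
    by_cases hh : is_hosted_label l
    · -- candidate becomes `some l`; a full carried candidate is returned unchanged
      have keep : ∀ (ms : List String) (c : String), "self-hosted" ∉ ms →
          pvBGo ms (some c) = some c := by
        intro ms
        induction ms with
        | nil => intro c _; rfl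
        | cons m ms ihm =>
          intro c hm
          have hm1 : m ≠ "self-hosted" := fun e => hm (e ▸ List.mem_cons_self)
          have hm2 : "self-hosted" ∉ ms := fun x => hm (List.mem_cons_of_mem _ x)
          simp [pvBGo, hm1, ihm _ hm2]
      simp [hh, keep ls l hls]
    · simp [hh, ih hls]

-- ===== VERDICT (by name: the statement is the Claim_ definition above) =====
theorem classify_hosted_label_spec : Claim_equal_classify_hosted_label := by
  intro labels _
  unfold Spec_classify_hosted_label classify_hosted_label classify_hosted_label_alt
  by_cases hmem : "self-hosted" ∈ labels
  · have : labels.any (fun l => l == "self-hosted") = true := by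
      simp only [List.any_eq_true]; exact ⟨_, hmem, by simp⟩
    have hne : labels ≠ [] := by rintro rfl; cases hmem
    simp [hne, this, pvBGo_self_hosted labels none hmem]
  · have : labels.any (fun l => l == "self-hosted") = false := by
      rw [List.any_eq_false]
      intro x hx
      intro e; exact hmem ((eq_of_beq e) ▸ hx)
    rcases labels with _ | ⟨l, ls⟩
    · rfl
    · simp [this, pvBGo_no_self _ hmem]
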